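-- pv_equiv track=rewrite | github.com/foleyj2/telly-spelly | shortcuts.py | _parse_combo
-- ===== SOURCE A (Python) =====
-- from typing import List, Set, Optional
--
-- KEY_LEFTCTRL = 29
--
-- KEY_RIGHTCTRL = 97
--
-- KEY_LEFTALT = 56
--
-- KEY_RIGHTALT = 100
--
-- KEY_LEFTSHIFT = 42
--
-- KEY_RIGHTSHIFT = 54
--
-- KEY_LEFTMETA = 125
--
-- KEY_RIGHTMETA = 126
--
-- KEY_LETTERS = {
--     'a': 30, 'b': 48, 'c': 46, 'd': 32, 'e': 18, 'f': 33, 'g': 34, 'h': 35,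
--     'i': 23, 'j': 36, 'k': 37, 'l': 38, 'm': 50, 'n': 49, 'o': 24, 'p': 25,
--     'q': 16, 'r': 19, 's': 31, 't': 20, 'u': 22, 'v': 47, 'w': 17, 'x': 45,
--     'y': 21, 'z': 44
-- }
--
-- def _parse_combo(combo_str: str) -> List[Set[int]]:
--     """Parse a combo string to a list of key code groups.
--
--     Each group is a set of equivalent keys (e.g., left ctrl OR right ctrl).
--     Returns a list of groups - all groups must have at least one key pressed.
--     """
--     groups: List[Set[int]] = []
--     parts = combo_str.lower().replace(' ', '').split('+')
--
--     for part in parts: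
--         if part in ('ctrl', 'control'):
--             groups.append({KEY_LEFTCTRL, KEY_RIGHTCTRL})
--         elif part == 'alt':
--             groups.append({KEY_LEFTALT, KEY_RIGHTALT})
--         elif part == 'shift':
--             groups.append({KEY_LEFTSHIFT, KEY_RIGHTSHIFT})
--         elif part in ('super', 'meta', 'win'):
--             groups.append({KEY_LEFTMETA, KEY_RIGHTMETA})
--         elif len(part) == 1 and part in KEY_LETTERS:
--             groups.append({KEY_LETTERS[part]})
--
--     return groups
-- ===== SOURCE B (Python) =====
-- # Single-pass scanner: instead of A's lower/replace/split preprocessing plus an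
-- # if/elif chain, B streams the characters once, building the current token in
-- # place (skipping spaces, lowercasing on the fly) and flushing it through a
-- # key-code table at each '+' and at the end.
-- _KEY_TABLE = {
--     'ctrl': (29, 97), 'control': (29, 97),
--     'alt': (56, 100),
--     'shift': (42, 54),
--     'super': (125, 126), 'meta': (125, 126), 'win': (125, 126),
--     'a': (30,), 'b': (48,), 'c': (46,), 'd': (32,), 'e': (18,), 'f': (33,),
--     'g': (34,), 'h': (35,), 'i': (23,), 'j': (36,), 'k': (37,), 'l': (38,),
--     'm': (50,), 'n': (49,), 'o': (24,), 'p': (25,), 'q': (16,), 'r': (19,),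
--     's': (31,), 't': (20,), 'u': (22,), 'v': (47,), 'w': (17,), 'x': (45,),
--     'y': (21,), 'z': (44,)
-- }
--
-- def _parse_combo(combo_str):
--     groups = []
--     token = []
--     for ch in combo_str + '+':   # sentinel '+' flushes the final token
--         if ch == ' ':
--             continue
--         if ch == '+':
--             codes = _KEY_TABLE.get(''.join(token))
--             if codes is not None:
--                 groups.append(set(codes))
--             token = []
--         else:
--             token.append(ch.lower())
--     return groups
-- ===== Notes on version B (the rewrite author's own statement) =====
-- stated objective: alternative
-- what changed: Replaces A's three staged passes (lower(), replace(' ',''), split('+')) plus a per-part if/elif chain with a single-pass character scanner that skips spaces, lowercases each character on the fly, accumulates the current token and flushes it through a key-code table at every '+' and at the end.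
import Mathlib
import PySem

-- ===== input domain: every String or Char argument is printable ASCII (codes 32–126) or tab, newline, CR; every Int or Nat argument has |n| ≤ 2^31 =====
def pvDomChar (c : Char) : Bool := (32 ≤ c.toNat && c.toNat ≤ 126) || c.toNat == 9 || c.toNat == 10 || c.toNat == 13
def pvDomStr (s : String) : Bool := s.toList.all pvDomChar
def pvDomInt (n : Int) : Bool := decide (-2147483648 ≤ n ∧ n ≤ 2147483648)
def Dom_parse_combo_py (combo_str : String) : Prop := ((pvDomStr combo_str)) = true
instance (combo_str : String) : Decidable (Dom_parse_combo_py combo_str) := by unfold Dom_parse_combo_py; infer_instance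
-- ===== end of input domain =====

-- B replaces A's three-pass preprocessing (lower, replace, split) + if/elif chain by a
-- single-pass character scanner that builds each token in place and flushes it through a
-- key-code table (objective: alternative decomposition). Python sets are
-- ported as lists of their distinct elements.

-- ===== PORT A =====
-- KEY_LETTERS, a module-level dict literal.
def KEY_LETTERS : PySem.Dict String Int := PySem.Dict.ofList [("a", 30), ("b", 48), ("c", 46), ("d", 32), ("e", 18), ("f", 33), ("g", 34), ("h", 35), ("i", 23), ("j", 36), ("k", 37), ("l", 38), ("m", 50), ("n", 49), ("o", 24), ("p", 25), ("q", 16), ("r", 19), ("s", 31), ("t", 20), ("u", 22), ("v", 47), ("w", 17), ("x", 45), ("y", 21), ("z", 44)]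

-- the body of A's for-loop: the if/elif chain appending one group (or nothing).
-- KEY_LETTERS[part] is guarded by `part in KEY_LETTERS`, so `getD part 0` is exact.
def aStep (groups : List (List Int)) (part : String) : List (List Int) :=
  if part = "ctrl" ∨ part = "control" then groups ++ [[29, 97]]
  else if part = "alt" then groups ++ [[56, 100]]
  else if part = "shift" then groups ++ [[42, 54]]
  else if part = "super" ∨ part = "meta" ∨ part = "win" then groups ++ [[125, 126]]
  else if PySem.Str.len part = 1 ∧ KEY_LETTERS.contains part then
    groups ++ [[KEY_LETTERS.getD part 0]]
  else groups

-- split('+') has the non-empty literal separator "+", so split? is always `some`.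
def parse_combo_py (combo_str : String) : List (List Int) :=
  ((PySem.Str.split? (PySem.Str.replace (PySem.Str.lower combo_str) " " "") "+").getD []).foldl aStep []

-- ===== PORT B =====
-- _KEY_TABLE, Source B's module-level table (tuples of key codes → lists).
def keyTable : PySem.Dict String (List Int) := PySem.Dict.ofList [("ctrl", [29, 97]), ("control", [29, 97]), ("alt", [56, 100]), ("shift", [42, 54]), ("super", [125, 126]), ("meta", [125, 126]), ("win", [125, 126]), ("a", [30]), ("b", [48]), ("c", [46]), ("d", [32]), ("e", [18]), ("f", [33]), ("g", [34]), ("h", [35]), ("i", [23]), ("j", [36]), ("k", [37]), ("l", [38]), ("m", [50]), ("n", [49]), ("o", [24]), ("p", [25]), ("q", [16]), ("r", [19]), ("s", [31]), ("t", [20]), ("u", [22]), ("v", [47]), ("w", [17]), ("x", [45]), ("y", [21]), ("z", [44])]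

-- Source B's loop body over (groups, token): skip ' ', flush the token at '+',
-- otherwise append ch.lower() (PySem.Chars.lowerChar is exact per-char lower).
-- token is the List Char the Python builds; ''.join(token) is String.ofList token.
def bStep (st : List (List Int) × List Char) (ch : Char) : List (List Int) × List Char :=
  if ch = ' ' then st
  else if ch = '+' then
    ((match keyTable.get? (String.ofList st.2) with
      | some codes => st.1 ++ [codes]
      | none => st.1), [])
  else (st.1, st.2 ++ [PySem.Chars.lowerChar ch])

-- Source B iterates over combo_str + '+' (the sentinel flushing the last token).
def parse_combo_py_alt (combo_str : String) : List (List Int) :=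
  ((combo_str.toList ++ ['+']).foldl bStep ([], [])).1

-- ===== PRECONDITION & SPEC =====
def Spec_parse_combo_py (combo_str : String) (out : List (List Int)) : Prop := out = parse_combo_py_alt combo_str
instance (combo_str : String) (out : List (List Int)) : Decidable (Spec_parse_combo_py combo_str out) := by unfold Spec_parse_combo_py; infer_instance

-- ===== CLAIM (what is proved, stated in full; the proofs are below) =====
def Claim_equal_parse_combo_py : Prop := ∀ (combo_str : String), Dom_parse_combo_py combo_str → Spec_parse_combo_py combo_str (parse_combo_py combo_str)

-- ===== LEMMAS AND PROOFS =====

-- proof-only helpers: split a char list on '+' into (first part, later parts)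
def splitParts : List Char → List Char × List (List Char)
  | [] => ([], [])
  | c :: cs =>
    let r := splitParts cs
    if c = '+' then ([], r.1 :: r.2) else (c :: r.1, r.2)

-- A's preprocessing on the char level: lowercase, then drop spaces
def ppChars (cs : List Char) : List Char := (cs.map PySem.Chars.lowerChar).filter (· != ' ')

set_option maxRecDepth 8192 in
lemma keyTable_mk : keyTable = PySem.Dict.mk [("ctrl", [29, 97]), ("control", [29, 97]), ("alt", [56, 100]), ("shift", [42, 54]), ("super", [125, 126]), ("meta", [125, 126]), ("win", [125, 126]), ("a", [30]), ("b", [48]), ("c", [46]), ("d", [32]), ("e", [18]), ("f", [33]), ("g", [34]), ("h", [35]), ("i", [23]), ("j", [36]), ("k", [37]), ("l", [38]), ("m", [50]), ("n", [49]), ("o", [24]), ("p", [25]), ("q", [16]), ("r", [19]), ("s", [31]), ("t", [20]), ("u", [22]), ("v", [47]), ("w", [17]), ("x", [45]), ("y", [21]), ("z", [44])] := by decide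

set_option maxRecDepth 8192 in
lemma KEY_LETTERS_mk : KEY_LETTERS = PySem.Dict.mk [("a", 30), ("b", 48), ("c", 46), ("d", 32), ("e", 18), ("f", 33), ("g", 34), ("h", 35), ("i", 23), ("j", 36), ("k", 37), ("l", 38), ("m", 50), ("n", 49), ("o", 24), ("p", 25), ("q", 16), ("r", 19), ("s", 31), ("t", 20), ("u", 22), ("v", 47), ("w", 17), ("x", 45), ("y", 21), ("z", 44)] := by decide

-- per-part agreement: A's if/elif chain appends exactly what B's table lookup yields
lemma aStep_eq (groups : List (List Int)) (part : String) :
    aStep groups part = groups ++ (keyTable.get? part).toList := by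
  by_cases h0 : part = "ctrl"
  · subst h0; simp [aStep, keyTable_mk, PySem.Dict.get?]
  by_cases h1 : part = "control"
  · subst h1; simp [aStep, keyTable_mk, PySem.Dict.get?]
  by_cases h2 : part = "alt"
  · subst h2; simp [aStep, keyTable_mk, PySem.Dict.get?]
  by_cases h3 : part = "shift"
  · subst h3; simp [aStep, keyTable_mk, PySem.Dict.get?]
  by_cases h4 : part = "super"
  · subst h4; simp [aStep, keyTable_mk, PySem.Dict.get?]
  by_cases h5 : part = "meta"
  · subst h5; simp [aStep, keyTable_mk, PySem.Dict.get?]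
  by_cases h6 : part = "win"
  · subst h6; simp [aStep, keyTable_mk, PySem.Dict.get?]
  by_cases h7 : part = "a"
  · subst h7; simp [aStep, keyTable_mk, KEY_LETTERS_mk, PySem.Dict.get?, PySem.Dict.getD, PySem.Str.len]
  by_cases h8 : part = "b"
  · subst h8; simp [aStep, keyTable_mk, KEY_LETTERS_mk, PySem.Dict.get?, PySem.Dict.getD, PySem.Str.len]
  by_cases h9 : part = "c"
  · subst h9; simp [aStep, keyTable_mk, KEY_LETTERS_mk, PySem.Dict.get?, PySem.Dict.getD, PySem.Str.len]
  by_cases h10 : part = "d"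
  · subst h10; simp [aStep, keyTable_mk, KEY_LETTERS_mk, PySem.Dict.get?, PySem.Dict.getD, PySem.Str.len]
  by_cases h11 : part = "e"
  · subst h11; simp [aStep, keyTable_mk, KEY_LETTERS_mk, PySem.Dict.get?, PySem.Dict.getD, PySem.Str.len]
  by_cases h12 : part = "f"
  · subst h12; simp [aStep, keyTable_mk, KEY_LETTERS_mk, PySem.Dict.get?, PySem.Dict.getD, PySem.Str.len]
  by_cases h13 : part = "g"
  · subst h13; simp [aStep, keyTable_mk, KEY_LETTERS_mk, PySem.Dict.get?, PySem.Dict.getD, PySem.Str.len]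
  by_cases h14 : part = "h"
  · subst h14; simp [aStep, keyTable_mk, KEY_LETTERS_mk, PySem.Dict.get?, PySem.Dict.getD, PySem.Str.len]
  by_cases h15 : part = "i"
  · subst h15; simp [aStep, keyTable_mk, KEY_LETTERS_mk, PySem.Dict.get?, PySem.Dict.getD, PySem.Str.len]
  by_cases h16 : part = "j"
  · subst h16; simp [aStep, keyTable_mk, KEY_LETTERS_mk, PySem.Dict.get?, PySem.Dict.getD, PySem.Str.len]
  by_cases h17 : part = "k"
  · subst h17; simp [aStep, keyTable_mk, KEY_LETTERS_mk, PySem.Dict.get?, PySem.Dict.getD, PySem.Str.len]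
  by_cases h18 : part = "l"
  · subst h18; simp [aStep, keyTable_mk, KEY_LETTERS_mk, PySem.Dict.get?, PySem.Dict.getD, PySem.Str.len]
  by_cases h19 : part = "m"
  · subst h19; simp [aStep, keyTable_mk, KEY_LETTERS_mk, PySem.Dict.get?, PySem.Dict.getD, PySem.Str.len]
  by_cases h20 : part = "n"
  · subst h20; simp [aStep, keyTable_mk, KEY_LETTERS_mk, PySem.Dict.get?, PySem.Dict.getD, PySem.Str.len]
  by_cases h21 : part = "o"
  · subst h21; simp [aStep, keyTable_mk, KEY_LETTERS_mk, PySem.Dict.get?, PySem.Dict.getD, PySem.Str.len]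
  by_cases h22 : part = "p"
  · subst h22; simp [aStep, keyTable_mk, KEY_LETTERS_mk, PySem.Dict.get?, PySem.Dict.getD, PySem.Str.len]
  by_cases h23 : part = "q"
  · subst h23; simp [aStep, keyTable_mk, KEY_LETTERS_mk, PySem.Dict.get?, PySem.Dict.getD, PySem.Str.len]
  by_cases h24 : part = "r"
  · subst h24; simp [aStep, keyTable_mk, KEY_LETTERS_mk, PySem.Dict.get?, PySem.Dict.getD, PySem.Str.len]
  by_cases h25 : part = "s"
  · subst h25; simp [aStep, keyTable_mk, KEY_LETTERS_mk, PySem.Dict.get?, PySem.Dict.getD, PySem.Str.len]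
  by_cases h26 : part = "t"
  · subst h26; simp [aStep, keyTable_mk, KEY_LETTERS_mk, PySem.Dict.get?, PySem.Dict.getD, PySem.Str.len]
  by_cases h27 : part = "u"
  · subst h27; simp [aStep, keyTable_mk, KEY_LETTERS_mk, PySem.Dict.get?, PySem.Dict.getD, PySem.Str.len]
  by_cases h28 : part = "v"
  · subst h28; simp [aStep, keyTable_mk, KEY_LETTERS_mk, PySem.Dict.get?, PySem.Dict.getD, PySem.Str.len]
  by_cases h29 : part = "w"
  · subst h29; simp [aStep, keyTable_mk, KEY_LETTERS_mk, PySem.Dict.get?, PySem.Dict.getD, PySem.Str.len]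
  by_cases h30 : part = "x"
  · subst h30; simp [aStep, keyTable_mk, KEY_LETTERS_mk, PySem.Dict.get?, PySem.Dict.getD, PySem.Str.len]
  by_cases h31 : part = "y"
  · subst h31; simp [aStep, keyTable_mk, KEY_LETTERS_mk, PySem.Dict.get?, PySem.Dict.getD, PySem.Str.len]
  by_cases h32 : part = "z"
  · subst h32; simp [aStep, keyTable_mk, KEY_LETTERS_mk, PySem.Dict.get?, PySem.Dict.getD, PySem.Str.len]
  simp [aStep, keyTable_mk, KEY_LETTERS_mk, PySem.Dict.get?, PySem.Dict.contains, h0, h1, h2, h3, h4, h5, h6, Ne.symm h0, Ne.symm h1, Ne.symm h2, Ne.symm h3, Ne.symm h4, Ne.symm h5, Ne.symm h6, Ne.symm h7, Ne.symm h8, Ne.symm h9, Ne.symm h10, Ne.symm h11, Ne.symm h12, Ne.symm h13, Ne.symm h14, Ne.symm h15, Ne.symm h16, Ne.symm h17, Ne.symm h18, Ne.symm h19, Ne.symm h20, Ne.symm h21, Ne.symm h22, Ne.symm h23, Ne.symm h24, Ne.symm h25, Ne.symm h26, Ne.symm h27, Ne.symm h28, Ne.symm h29, Ne.symm h30, Ne.symm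 h31, Ne.symm h32]

lemma foldl_aStep (parts : List String) (g : List (List Int)) :
    parts.foldl aStep g = g ++ parts.filterMap (fun p => keyTable.get? p) := by
  induction parts generalizing g with
  | nil => simp
  | cons p ps ih =>
    rw [List.foldl_cons, ih, aStep_eq, List.filterMap_cons]
    cases keyTable.get? p <;> simp

-- lowerChar maps only 'A'..'Z' (to 'a'..'z'), so it fixes ' ' and '+' and hits neither
lemma lowerChar_eq_space_iff (c : Char) : PySem.Chars.lowerChar c = ' ' ↔ c = ' ' := by
  unfold PySem.Chars.lowerChar PySem.Chars.isupper
  split_ifs with h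
  · simp only [Bool.and_eq_true, decide_eq_true_eq] at h
    have hA : 65 ≤ c.toNat := h.1
    have hv : (c.toNat + 32).isValidChar := by
      left; have : c.toNat ≤ 90 := h.2; omega
    have ht : (Char.ofNat (c.toNat + 32)).toNat = c.toNat + 32 := by simp [Char.ofNat, hv]
    constructor
    · intro he; rw [he] at ht
      have h32 : (' ' : Char).toNat = 32 := rfl
      omega
    · intro he; subst he
      exact absurd hA (by decide)
  · exact Iff.rfl

lemma lowerChar_eq_plus_iff (c : Char) : PySem.Chars.lowerChar c = '+' ↔ c = '+' := by
  unfold PySem.Chars.lowerChar PySem.Chars.isupper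
  split_ifs with h
  · simp only [Bool.and_eq_true, decide_eq_true_eq] at h
    have hA : 65 ≤ c.toNat := h.1
    have hv : (c.toNat + 32).isValidChar := by
      left; have : c.toNat ≤ 90 := h.2; omega
    have ht : (Char.ofNat (c.toNat + 32)).toNat = c.toNat + 32 := by simp [Char.ofNat, hv]
    constructor
    · intro he; rw [he] at ht
      have h43 : ('+' : Char).toNat = 43 := rfl
      omega
    · intro he; subst he
      exact absurd hA (by decide)
  · exact Iff.rfl

-- replace s ' ' '' on the char level is just filtering the spaces out
lemma replace_go_space (fuel : Nat) (l acc : List Char) (h : l.length ≤ fuel) :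
    PySem.Chars.replace.go [' '] [] fuel l acc = acc.reverse ++ l.filter (· != ' ') := by
  induction fuel generalizing l acc with
  | zero =>
    have : l = [] := List.eq_nil_of_length_eq_zero (Nat.le_zero.mp h)
    subst this; simp [PySem.Chars.replace.go]
  | succ f ih =>
    cases l with
    | nil => simp [PySem.Chars.replace.go]
    | cons c t =>
      simp only [PySem.Chars.replace.go]
      by_cases hc : c = ' '
      · subst hc
        have hp : [' '].isPrefixOf (' ' :: t) = true := by simp [List.isPrefixOf]
        rw [if_pos hp]
        simp only [List.length_cons] at h
        rw [ih _ _ (by simpa using Nat.le_of_succ_le_succ h)]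
        simp
      · have hp : [' '].isPrefixOf (c :: t) = false := by
          simp [List.isPrefixOf, Ne.symm hc]
        rw [if_neg (by simp [hp])]
        simp only [List.length_cons] at h
        rw [ih _ _ (Nat.le_of_succ_le_succ h)]
        simp [hc]

lemma replace_space (cs : List Char) :
    PySem.Chars.replace cs [' '] [] = cs.filter (· != ' ') := by
  unfold PySem.Chars.replace
  rw [if_neg (by simp)]
  simpa using replace_go_space cs.length cs [] le_rfl

-- splitOn '+' on the char level computes splitParts
lemma splitOn_go_plus (fuel : Nat) (l cur : List Char) (acc : List (List Char))
    (h : l.length < fuel) :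
    PySem.Chars.splitOn.go ['+'] fuel l cur acc =
      acc.reverse ++ (cur.reverse ++ (splitParts l).1) :: (splitParts l).2 := by
  induction fuel generalizing l cur acc with
  | zero => omega
  | succ f ih =>
    cases l with
    | nil => simp [PySem.Chars.splitOn.go, splitParts]
    | cons c t =>
      simp only [PySem.Chars.splitOn.go]
      by_cases hc : c = '+'
      · subst hc
        have hp : ['+'].isPrefixOf ('+' :: t) = true := by simp [List.isPrefixOf]
        rw [if_pos hp]
        simp only [List.length_cons] at h
        rw [ih _ _ _ (by simpa using Nat.lt_of_succ_lt_succ h)]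
        simp [splitParts]
      · have hp : ['+'].isPrefixOf (c :: t) = false := by
          simp [List.isPrefixOf, Ne.symm hc]
        rw [if_neg (by simp [hp])]
        simp only [List.length_cons] at h
        rw [ih _ _ _ (Nat.lt_of_succ_lt_succ h)]
        simp [splitParts, hc]

lemma splitOn_plus (cs : List Char) :
    PySem.Chars.splitOn cs ['+'] = (splitParts cs).1 :: (splitParts cs).2 := by
  unfold PySem.Chars.splitOn
  simpa using splitOn_go_plus (cs.length + 1) cs [] [] (Nat.lt_succ_self _)

-- the scanner invariant: folding bStep over cs ++ ['+'] from (groups, token) yields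
-- groups plus the table hits of the tokens of token ++ ppChars cs
set_option maxRecDepth 16384 in
lemma foldl_bStep (cs : List Char) (token : List Char) (groups : List (List Int)) :
    ((cs ++ ['+']).foldl bStep (groups, token)).1 =
      groups ++ ((token ++ (splitParts (ppChars cs)).1) :: (splitParts (ppChars cs)).2).filterMap
        (fun p => keyTable.get? (String.ofList p)) := by
  induction cs generalizing token groups with
  | nil =>
    simp only [List.nil_append, List.foldl_cons, List.foldl_nil, bStep, ppChars, splitParts,
      List.map_nil, List.filter_nil, if_neg (by decide : ¬ ('+' : Char) = ' ')]
    cases hg : keyTable.get? (String.ofList token) <;> simp [hg]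
  | cons c t ih =>
    by_cases hsp : c = ' '
    · subst hsp
      simp only [List.cons_append, List.foldl_cons, bStep]
      rw [ih]
      have : ppChars (' ' :: t) = ppChars t := by
        simp [ppChars, (lowerChar_eq_space_iff ' ').mpr rfl]
      rw [this]
      simp
    · by_cases hpl : c = '+'
      · subst hpl
        simp only [List.cons_append, List.foldl_cons, bStep,
          if_neg (by decide : ¬ ('+' : Char) = ' ')]
        have hpp : ppChars ('+' :: t) = '+' :: ppChars t := by
          simp [ppChars, (lowerChar_eq_plus_iff '+').mpr rfl]
        rw [hpp]
        simp only [splitParts]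
        cases hg : keyTable.get? (String.ofList token) <;>
          · rw [ih]
            simp [List.filterMap_cons, hg]
      · simp only [List.cons_append, List.foldl_cons, bStep, if_neg hsp, if_neg hpl]
        rw [ih]
        have hlsp : (PySem.Chars.lowerChar c != ' ') = true := by
          simp [lowerChar_eq_space_iff, hsp]
        have hlpl : ¬ PySem.Chars.lowerChar c = '+' := by
          simp [lowerChar_eq_plus_iff, hpl]
        have hpp : ppChars (c :: t) = PySem.Chars.lowerChar c :: ppChars t := by
          simp [ppChars, hlsp]
        rw [hpp]
        simp [splitParts, hlpl]

-- ===== VERDICT (by name: the statement is the Claim_ definition above) =====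
set_option maxRecDepth 16384 in
theorem parse_combo_py_spec : Claim_equal_parse_combo_py := by
  intro combo_str _
  unfold Spec_parse_combo_py parse_combo_py parse_combo_py_alt
  rw [foldl_bStep]
  have hsplit : PySem.Str.split? (PySem.Str.replace (PySem.Str.lower combo_str) " " "") "+" =
      some ((PySem.Chars.splitOn (ppChars combo_str.toList) ['+']).map String.ofList) := by
    unfold PySem.Str.split? PySem.Chars.split?
    rw [if_neg (by decide)]
    have ht : (PySem.Str.replace (PySem.Str.lower combo_str) " " "").toList =
        ppChars combo_str.toList := by
      simp [PySem.Str.replace, PySem.Str.lower, replace_space, ppChars, PySem.Chars.lower]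
    simp [ht]
  rw [hsplit]
  simp only [Option.getD_some]
  rw [foldl_aStep, List.nil_append, splitOn_plus, List.map_cons, List.filterMap_cons,
    List.filterMap_cons, List.filterMap_map]
  simp
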